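-- pv_equiv track=rewrite | github.com/anonymousAAK/my-DSA-journey | Week 8/searching.py | koko_bananas
-- ===== SOURCE A (Python) =====
-- import math
-- from typing import List, Optional
--
-- def koko_bananas(piles: List[int], h: int) -> int:
--     """Koko loves bananas.  She has *h* hours to eat all *piles*.
--     Return the minimum eating speed *k* (bananas/hour).
--
--     Binary search on the answer space [1, max(piles)].  For a given speed,
--     compute total hours needed: sum(ceil(p / k) for p in piles).
--
--     Time:  O(n * log(max_pile))
--     Space: O(1)
--     """
--
--     def hours_needed(speed: int) -> int:
--         return sum(math.ceil(p / speed) for p in piles)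
--
--     lo, hi = 1, max(piles)
--     while lo < hi:
--         mid = lo + (hi - lo) // 2
--         if hours_needed(mid) <= h:
--             hi = mid  # try slower
--         else:
--             lo = mid + 1  # need faster
--     return lo
-- ===== SOURCE B (Python) =====
-- def koko_bananas(piles, h):
--     """Minimum eating speed by an increasing skip-scan over the breakpoints of
--     the total-hours function: the speeds are tried in increasing order, but
--     between two breakpoints no pile's hour count can drop, so the scan jumps
--     straight to the next speed where some pile's ceiling decreases.  The first
--     feasible speed reached is returned (max(piles) at the latest)."""
--     hi = max(piles)
--     k = 1
--     while k < hi: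
--         total = 0
--         nk = hi
--         for p in piles:
--             q = -(-p // k)          # ceil(p / k), exact integer arithmetic
--             total += q
--             if q > 1:
--                 c = -(-p // (q - 1))  # first speed where this pile needs < q hours
--                 if c < nk:
--                     nk = c
--         if total <= h:
--             return k
--         k = nk
--     return k
-- ===== Notes on version B (the rewrite author's own statement) =====
-- stated objective: alternative
-- what changed: Replaces A's lo/hi binary search over the answer space with an increasing skip-scan over the breakpoints of the total-hours function (jump directly to the next speed at which some pile's hour count drops, return the first feasible speed), using exact integer ceiling division -(-p//k) instead of float math.ceil.
-- outside the precondition, e.g. on koko_bananas([-12, 3, 3], -6): A returns 3, B returns 1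
import Mathlib
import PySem

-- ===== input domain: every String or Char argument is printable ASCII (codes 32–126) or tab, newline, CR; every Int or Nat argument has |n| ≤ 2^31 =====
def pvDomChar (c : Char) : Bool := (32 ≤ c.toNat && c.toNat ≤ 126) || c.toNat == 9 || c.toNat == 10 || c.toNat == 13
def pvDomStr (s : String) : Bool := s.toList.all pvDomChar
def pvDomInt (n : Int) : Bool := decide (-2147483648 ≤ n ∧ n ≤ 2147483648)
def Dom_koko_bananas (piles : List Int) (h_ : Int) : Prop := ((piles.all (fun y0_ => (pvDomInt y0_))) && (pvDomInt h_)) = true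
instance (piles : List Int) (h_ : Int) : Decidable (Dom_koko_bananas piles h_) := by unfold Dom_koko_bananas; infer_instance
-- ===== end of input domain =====

-- B replaces A's binary search over [1, max(piles)] with an increasing skip-scan over
-- the breakpoints of the total-hours function (jump to the next speed where some pile's
-- ceiling drops, return the first feasible speed), with exact integer ceiling division
-- instead of float math.ceil; an alternative algorithm, not faster.


-- ===== PORT A =====
-- math.ceil(p / speed): on Dom (|p| ≤ 2^31) with 1 ≤ speed, Python's float division
-- never rounds across an integer, so A's float ceil equals the exact integer ceiling.
def hoursNeeded (piles : List Int) (speed : Int) : Int :=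
  (piles.map (fun p => -(PySem.Int.floordiv (-p) speed))).sum

-- while lo < hi: mid = lo + (hi - lo) // 2; if hours_needed(mid) <= h: hi = mid else
-- lo = mid + 1.  The Nat fuel only makes the loop total (each step shrinks hi - lo,
-- and the initial fuel below is enough, so the 0 case is never reached).
def kokoSearch (piles : List Int) (h_ : Int) : Nat → Int → Int → Int
  | 0, lo, _ => lo
  | fuel + 1, lo, hi =>
    if lo < hi then
      let mid := lo + PySem.Int.floordiv (hi - lo) 2
      if hoursNeeded piles mid ≤ h_ then kokoSearch piles h_ fuel lo mid
      else kokoSearch piles h_ fuel (mid + 1) hi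
    else lo

def koko_bananas (piles : List Int) (h_ : Int) : Int :=
  match PySem.List.max? piles (fun x => x) with
  | none => 0   -- max([]) raises ValueError; excluded by Pre_
  | some m => kokoSearch piles h_ (m - 1).toNat 1 m

-- ===== PORT B =====
-- loop body over piles: total += ceil(p/k); if q > 1: nk = min(nk, ceil(p/(q-1)))
def stepTN (k : Int) (st : Int × Int) (p : Int) : Int × Int :=
  let q := -(PySem.Int.floordiv (-p) k)
  let total := st.1 + q
  let nk := if 1 < q then
      let c := -(PySem.Int.floordiv (-p) (q - 1))
      if c < st.2 then c else st.2
    else st.2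
  (total, nk)

-- while k < hi: compute (total, nk); if total <= h: return k; k = nk.  The Nat fuel
-- only makes the loop total (nk > k each step, and the initial fuel below is enough,
-- so the 0 case is never reached).
def scanB (piles : List Int) (h_ : Int) : Nat → Int → Int → Int
  | 0, _, k => k
  | fuel + 1, hi, k =>
    if k < hi then
      let tn := piles.foldl (stepTN k) (0, hi)
      if tn.1 ≤ h_ then k else scanB piles h_ fuel hi tn.2
    else k

def koko_bananas_alt (piles : List Int) (h_ : Int) : Int :=
  match PySem.List.max? piles (fun x => x) with
  | none => 0   -- max([]) raises ValueError; excluded by Pre_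
  | some hi => scanB piles h_ (hi - 1).toNat hi 1

-- ===== PRECONDITION & SPEC =====
-- Pre_ excludes empty piles (max([]) raises ValueError, in both A and B) and mixed-sign
-- piles whose positive total exceeds h: there the hours function is non-monotone in the
-- speed, no minimum feasible speed is specified, and either search order's answer is
-- defensible.
def Pre_koko_bananas (piles : List Int) (h_ : Int) : Prop :=
  piles ≠ [] ∧
    ((∀ p ∈ piles, 0 ≤ p) ∨ (∀ p ∈ piles, p ≤ 0) ∨ (piles.map (fun p => max p 0)).sum ≤ h_)
instance (piles : List Int) (h_ : Int) : Decidable (Pre_koko_bananas piles h_) := by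
  unfold Pre_koko_bananas; infer_instance

def pvWitness_koko_bananas : List Int × Int := ([3, 6, 7, 11], 8)

def Spec_koko_bananas (piles : List Int) (h_ : Int) (out : Int) : Prop := out = koko_bananas_alt piles h_
instance (piles : List Int) (h_ : Int) (out : Int) : Decidable (Spec_koko_bananas piles h_ out) := by unfold Spec_koko_bananas; infer_instance

-- ===== CLAIM (what is proved, stated in full; the proofs are below) =====
def Claim_equal_koko_bananas : Prop := ∀ (piles : List Int) (h_ : Int), Dom_koko_bananas piles h_ → Pre_koko_bananas piles h_ → Spec_koko_bananas piles h_ (koko_bananas piles h_)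

-- ===== LEMMAS AND PROOFS =====

-- `pvFeas piles h_ k` = speed k finishes within h_ hours
def pvFeas (piles : List Int) (h_ k : Int) : Prop := hoursNeeded piles k ≤ h_

-- monotone feasibility (what the binary search exploits)
def pvPM (piles : List Int) (h_ : Int) : Prop :=
  ∀ k k' : Int, 1 ≤ k → k ≤ k' → pvFeas piles h_ k → pvFeas piles h_ k'

-- the common characterisation of both results when 1 ≤ hi
def pvIsRes (piles : List Int) (h_ hi r : Int) : Prop :=
  1 ≤ r ∧ r ≤ hi ∧ (pvFeas piles h_ r ∨ r = hi) ∧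
    ∀ j, 1 ≤ j → j < r → ¬ pvFeas piles h_ j

theorem pvIsRes_unique (piles : List Int) (h_ hi r₁ r₂ : Int)
    (h1 : pvIsRes piles h_ hi r₁) (h2 : pvIsRes piles h_ hi r₂) : r₁ = r₂ := by
  obtain ⟨a1, b1, c1, d1⟩ := h1
  obtain ⟨a2, b2, c2, d2⟩ := h2
  rcases lt_trichotomy r₁ r₂ with h | h | h
  · exact absurd (c1.resolve_right (by omega)) (d2 r₁ a1 h)
  · exact h
  · exact absurd (c2.resolve_right (by omega)) (d1 r₂ a2 h)

-- ceiling bounds: q = ⌈p/k⌉ satisfies (q-1)k < p ≤ qk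
theorem pvCeil_bounds (p k : Int) (hk : 0 < k) :
    (-(PySem.Int.floordiv (-p) k) - 1) * k < p ∧ p ≤ -(PySem.Int.floordiv (-p) k) * k :=
  (PySem.Int.neg_floordiv_neg_eq_iff_of_pos hk).mp rfl

theorem pvCeil_antitone (p k k' : Int) (hp : 0 ≤ p) (hk : 1 ≤ k) (hkk : k ≤ k') :
    -(PySem.Int.floordiv (-p) k') ≤ -(PySem.Int.floordiv (-p) k) := by
  obtain ⟨hl, hr⟩ := pvCeil_bounds p k (by omega)
  obtain ⟨hl', hr'⟩ := pvCeil_bounds p k' (by omega)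
  set q := -(PySem.Int.floordiv (-p) k) with hq
  set q' := -(PySem.Int.floordiv (-p) k') with hq'
  by_contra hcon
  have hcon' : q + 1 ≤ q' := by omega
  have hq0 : 0 ≤ q := by nlinarith
  have h1 : q * k' ≤ (q' - 1) * k' := by nlinarith
  have h2 : q * k ≤ q * k' := by nlinarith
  nlinarith

theorem pvCeil_le_pos (p k : Int) (hk : 1 ≤ k) :
    -(PySem.Int.floordiv (-p) k) ≤ max p 0 := by
  obtain ⟨hl, hr⟩ := pvCeil_bounds p k (by omega)
  set q := -(PySem.Int.floordiv (-p) k) with hq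
  rcases le_or_gt q 0 with h | h
  · omega
  · have : q - 1 ≤ (q - 1) * k := by nlinarith
    omega

theorem hours_le_sum_max (piles : List Int) (k : Int) (hk : 1 ≤ k) :
    hoursNeeded piles k ≤ (piles.map (fun p => max p 0)).sum := by
  induction piles with
  | nil => simp [hoursNeeded]
  | cons p t ih =>
    simp only [hoursNeeded, List.map_cons, List.sum_cons] at *
    exact add_le_add (pvCeil_le_pos p k hk) ih

theorem hours_antitone (piles : List Int) (k k' : Int) (hpos : ∀ p ∈ piles, 0 ≤ p)
    (hk : 1 ≤ k) (hkk : k ≤ k') : hoursNeeded piles k' ≤ hoursNeeded piles k := by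
  induction piles with
  | nil => simp [hoursNeeded]
  | cons p t ih =>
    simp only [hoursNeeded, List.map_cons, List.sum_cons] at *
    exact add_le_add (pvCeil_antitone p k k' (hpos p (by simp)) hk hkk)
      (ih (fun q hq => hpos q (by simp [hq])))

-- A's binary search satisfies the characterisation (given monotone feasibility and
-- enough fuel: each step shrinks hi - lo by at least 1)
theorem kokoSearch_spec (piles : List Int) (h_ : Int) (hPM : pvPM piles h_) :
    ∀ (fuel : Nat) (lo hi : Int), (hi - lo).toNat ≤ fuel → 1 ≤ lo → lo ≤ hi →
      lo ≤ kokoSearch piles h_ fuel lo hi ∧ kokoSearch piles h_ fuel lo hi ≤ hi ∧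
      (pvFeas piles h_ (kokoSearch piles h_ fuel lo hi) ∨ kokoSearch piles h_ fuel lo hi = hi) ∧
      ∀ j, lo ≤ j → j < kokoSearch piles h_ fuel lo hi → ¬ pvFeas piles h_ j := by
  intro fuel
  induction fuel with
  | zero =>
    intro lo hi hn hlo hlohi
    have hEq : kokoSearch piles h_ 0 lo hi = lo := rfl
    rw [hEq]
    exact ⟨le_refl lo, hlohi, Or.inr (by omega), by omega⟩
  | succ m ih =>
    intro lo hi hn hlo hlohi
    rw [kokoSearch]
    by_cases hlt : lo < hi
    · simp only [hlt, if_true]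
      have hfd := PySem.Int.floordiv_eq_ediv_of_pos (a := hi - lo) (b := 2) (by omega)
      set mid := lo + PySem.Int.floordiv (hi - lo) 2 with hmid
      have hmb : lo ≤ mid ∧ mid < hi := by rw [hmid, hfd]; omega
      by_cases hc : hoursNeeded piles mid ≤ h_
      · simp only [hc, if_pos]
        obtain ⟨a, b, c, d⟩ := ih lo mid (by rw [hmid, hfd]; omega) hlo (by omega)
        refine ⟨a, by omega, ?_, d⟩
        rcases c with c | c
        · exact Or.inl c
        · exact Or.inl (by rw [c]; exact hc)
      · simp only [hc, if_neg, not_false_iff]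
        obtain ⟨a, b, c, d⟩ := ih (mid + 1) hi (by omega) (by omega) (by omega)
        refine ⟨by omega, b, c, ?_⟩
        intro j hj1 hj2 hfeas
        rcases le_or_gt j mid with hjm | hjm
        · exact hc (hPM j mid (by omega) hjm hfeas)
        · exact d j (by omega) hj2 hfeas
    · simp only [hlt, if_false]
      exact ⟨le_refl lo, by omega, Or.inr (by omega), by omega⟩

-- the first component of the fold is the total-hours sum
theorem fold_fst (piles : List Int) (k : Int) :
    ∀ (a b : Int), (piles.foldl (stepTN k) (a, b)).1 = a + hoursNeeded piles k := by
  induction piles with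
  | nil => intro a b; simp [hoursNeeded]
  | cons p t ih =>
    intro a b
    simp only [List.foldl_cons, stepTN]
    rw [ih]
    simp only [hoursNeeded, List.map_cons, List.sum_cons]
    ring

-- the second component of the fold ignores the first
theorem fold_snd (piles : List Int) (k : Int) :
    ∀ (a b : Int), (piles.foldl (stepTN k) (a, b)).2 =
      piles.foldl (fun b p =>
        let q := -(PySem.Int.floordiv (-p) k)
        if 1 < q then
          let c := -(PySem.Int.floordiv (-p) (q - 1))
          if c < b then c else b
        else b) b := by
  induction piles with
  | nil => intro a b; rfl
  | cons p t ih =>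
    intro a b
    simp only [List.foldl_cons, stepTN]
    rw [ih]

-- the jump fold only shrinks its accumulator
theorem jump_fold_le (piles : List Int) (k : Int) :
    ∀ (b : Int), piles.foldl (fun b p =>
        let q := -(PySem.Int.floordiv (-p) k)
        if 1 < q then
          let c := -(PySem.Int.floordiv (-p) (q - 1))
          if c < b then c else b
        else b) b ≤ b := by
  induction piles with
  | nil => intro b; simp
  | cons p t ih =>
    intro b
    simp only [List.foldl_cons]
    set q := -(PySem.Int.floordiv (-p) k) with hq
    by_cases h1 : 1 < q
    · simp only [h1, if_pos]
      set c := -(PySem.Int.floordiv (-p) (q - 1)) with hc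
      by_cases h2 : c < b
      · simp only [h2, if_pos]
        exact le_trans (ih c) (by omega)
      · simp only [h2, if_neg, not_false_iff]
        exact ih b
    · simp only [h1, if_neg, not_false_iff]
      exact ih b

-- each candidate c = ceil(p/(q-1)) with q = ceil(p/k) ≥ 2 is strictly above k
theorem cand_gt (p k : Int) (hk : 1 ≤ k)
    (hq : 1 < -(PySem.Int.floordiv (-p) k)) :
    k < -(PySem.Int.floordiv (-p) (-(PySem.Int.floordiv (-p) k) - 1)) := by
  set q := -(PySem.Int.floordiv (-p) k) with hqdef
  obtain ⟨hl, hr⟩ := pvCeil_bounds p k (by omega)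
  obtain ⟨hl', hr'⟩ := pvCeil_bounds p (q - 1) (by omega)
  set c := -(PySem.Int.floordiv (-p) (q - 1)) with hcdef
  -- (q-1)k < p ≤ c(q-1), with q-1 ≥ 1, gives k < c
  nlinarith

-- the jump fold stays strictly above k
theorem jump_fold_gt (piles : List Int) (k : Int) (hk : 1 ≤ k) :
    ∀ (b : Int), k < b → k < piles.foldl (fun b p =>
        let q := -(PySem.Int.floordiv (-p) k)
        if 1 < q then
          let c := -(PySem.Int.floordiv (-p) (q - 1))
          if c < b then c else b
        else b) b := by
  induction piles with
  | nil => intro b hb; simpa using hb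
  | cons p t ih =>
    intro b hb
    simp only [List.foldl_cons]
    set q := -(PySem.Int.floordiv (-p) k) with hq
    by_cases h1 : 1 < q
    · simp only [h1, if_pos]
      set c := -(PySem.Int.floordiv (-p) (q - 1)) with hc
      by_cases h2 : c < b
      · simp only [h2, if_pos]
        exact ih c (cand_gt p k hk h1)
      · simp only [h2, if_neg, not_false_iff]
        exact ih b hb
    · simp only [h1, if_neg, not_false_iff]
      exact ih b hb

-- the jump fold's result bounds every member's candidate
theorem jump_fold_le_cand (piles : List Int) (k : Int) :
    ∀ (b : Int) (p : Int), p ∈ piles → 1 < -(PySem.Int.floordiv (-p) k) →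
      piles.foldl (fun b p =>
        let q := -(PySem.Int.floordiv (-p) k)
        if 1 < q then
          let c := -(PySem.Int.floordiv (-p) (q - 1))
          if c < b then c else b
        else b) b ≤ -(PySem.Int.floordiv (-p) (-(PySem.Int.floordiv (-p) k) - 1)) := by
  induction piles with
  | nil => intro b p hp; simp at hp
  | cons x t ih =>
    intro b p hp hq
    simp only [List.foldl_cons]
    rcases List.mem_cons.mp hp with h | h
    · subst h
      simp only [hq, if_pos]
      set c := -(PySem.Int.floordiv (-p) (-(PySem.Int.floordiv (-p) k) - 1)) with hc
      by_cases h2 : c < b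
      · simp only [h2, if_pos]
        exact jump_fold_le t k c
      · simp only [h2, if_neg, not_false_iff]
        exact le_trans (jump_fold_le t k b) (by omega)
    · exact ih _ p h hq

-- per-pile skip soundness: between k and this pile's candidate the hour count
-- cannot drop below its value at k
theorem term_ge (p k j : Int) (hk : 1 ≤ k) (hkj : k ≤ j)
    (hskip : 1 < -(PySem.Int.floordiv (-p) k) →
      j < -(PySem.Int.floordiv (-p) (-(PySem.Int.floordiv (-p) k) - 1))) :
    -(PySem.Int.floordiv (-p) k) ≤ -(PySem.Int.floordiv (-p) j) := by
  set q := -(PySem.Int.floordiv (-p) k) with hq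
  set r := -(PySem.Int.floordiv (-p) j) with hr
  obtain ⟨hl, hr1⟩ := pvCeil_bounds p k (by omega)
  obtain ⟨hl', hr2⟩ := pvCeil_bounds p j (by omega)
  rcases lt_trichotomy q 1 with h1 | h1 | h1
  · -- q ≤ 0: p ≤ 0, and a smaller r would put p above r*j
    by_contra hcon
    have hrq : r ≤ q - 1 := by omega
    have hp0 : p ≤ q * k := hr1
    nlinarith
  · -- q = 1: p > 0, so r ≥ 1
    have hp : 0 < p := by nlinarith
    by_contra hcon
    have hr0 : r ≤ 0 := by omega
    nlinarith
  · -- q ≥ 2: j is below the candidate, so the value cannot have dropped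
    have hj := hskip h1
    obtain ⟨hl'', hr3⟩ := pvCeil_bounds p (q - 1) (by omega)
    set c := -(PySem.Int.floordiv (-p) (q - 1)) with hc
    have hp : 0 < p := by nlinarith
    by_contra hcon
    have hrq : r ≤ q - 1 := by omega
    have hr1' : 1 ≤ r := by nlinarith
    nlinarith [mul_le_mul_of_nonneg_left (show j ≤ c - 1 by omega) (show (0:Int) ≤ r by omega)]

-- whole-list skip soundness
theorem hours_ge_of_skip (piles : List Int) (k j : Int) (hk : 1 ≤ k) (hkj : k ≤ j)
    (hskip : ∀ p ∈ piles, 1 < -(PySem.Int.floordiv (-p) k) →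
      j < -(PySem.Int.floordiv (-p) (-(PySem.Int.floordiv (-p) k) - 1))) :
    hoursNeeded piles k ≤ hoursNeeded piles j := by
  induction piles with
  | nil => simp [hoursNeeded]
  | cons p t ih =>
    simp only [hoursNeeded, List.map_cons, List.sum_cons] at *
    exact add_le_add (term_ge p k j hk hkj (hskip p (by simp)))
      (ih (fun x hx => hskip x (by simp [hx])))

-- B's skip-scan satisfies the characterisation (no monotonicity needed)
theorem scanB_spec (piles : List Int) (h_ hi : Int) :
    ∀ (fuel : Nat) (k : Int), (hi - k).toNat ≤ fuel → 1 ≤ k → k ≤ hi →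
      (∀ j, 1 ≤ j → j < k → ¬ pvFeas piles h_ j) →
      pvIsRes piles h_ hi (scanB piles h_ fuel hi k) := by
  intro fuel
  induction fuel with
  | zero =>
    intro k hn hk1 hkhi hbelow
    have hEq : scanB piles h_ 0 hi k = k := rfl
    rw [hEq]
    exact ⟨hk1, hkhi, Or.inr (by omega), hbelow⟩
  | succ m ih =>
    intro k hn hk1 hkhi hbelow
    rw [scanB]
    by_cases hlt : k < hi
    · simp only [hlt, if_true]
      have hfst := fold_fst piles k 0 hi
      have hsnd := fold_snd piles k 0 hi
      set tn := piles.foldl (stepTN k) (0, hi) with htn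
      by_cases hc : tn.1 ≤ h_
      · simp only [hc, if_pos]
        refine ⟨hk1, hkhi, Or.inl ?_, hbelow⟩
        unfold pvFeas; omega
      · simp only [hc, if_neg, not_false_iff]
        have hgt : k < tn.2 := by rw [hsnd]; exact jump_fold_gt piles k hk1 hi hlt
        have hle : tn.2 ≤ hi := by rw [hsnd]; exact jump_fold_le piles k hi
        refine ih tn.2 (by omega) (by omega) hle ?_
        intro j hj1 hj2
        rcases lt_or_ge j k with h | h
        · exact hbelow j hj1 h
        · -- k ≤ j < tn.2: the hours sum cannot have dropped below its value at k
          have hge : hoursNeeded piles k ≤ hoursNeeded piles j := by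
            refine hours_ge_of_skip piles k j hk1 h ?_
            intro p hp hq
            have := jump_fold_le_cand piles k hi p hp hq
            rw [← hsnd] at this
            omega
          unfold pvFeas
          omega
    · simp only [hlt, if_false]
      exact ⟨hk1, hkhi, Or.inr (by omega), hbelow⟩

-- for hi ≤ 0 both programs return 1 without probing any speed (fuel (hi-1).toNat = 0)
theorem kokoSearch_of_hi_nonpos (piles : List Int) (h_ hi : Int) (hhi : hi ≤ 0) :
    kokoSearch piles h_ (hi - 1).toNat 1 hi = 1 := by
  have : (hi - 1).toNat = 0 := by omega
  rw [this, kokoSearch]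

theorem scanB_of_hi_nonpos (piles : List Int) (h_ hi : Int) (hhi : hi ≤ 0) :
    scanB piles h_ (hi - 1).toNat hi 1 = 1 := by
  have : (hi - 1).toNat = 0 := by omega
  rw [this, scanB]

-- main equality for 1 ≤ hi and monotone feasibility
theorem main_of_mono (piles : List Int) (h_ hi : Int) (hhi : 1 ≤ hi) (hPM : pvPM piles h_) :
    kokoSearch piles h_ (hi - 1).toNat 1 hi = scanB piles h_ (hi - 1).toNat hi 1 := by
  have hA : pvIsRes piles h_ hi (kokoSearch piles h_ (hi - 1).toNat 1 hi) := by
    obtain ⟨a, b, c, d⟩ := kokoSearch_spec piles h_ hPM (hi - 1).toNat 1 hi (by omega)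
      (by omega) hhi
    exact ⟨a, b, c, d⟩
  have hB : pvIsRes piles h_ hi (scanB piles h_ (hi - 1).toNat hi 1) :=
    scanB_spec piles h_ hi (hi - 1).toNat 1 (by omega) (by omega) hhi (by omega)
  exact pvIsRes_unique piles h_ hi _ _ hA hB

-- ===== VERDICT (by name: the statement is the Claim_ definition above) =====
theorem koko_bananas_spec : Claim_equal_koko_bananas := by
  intro piles h_ _hdom hpre
  obtain ⟨hne, hdisj⟩ := hpre
  unfold Spec_koko_bananas koko_bananas koko_bananas_alt
  obtain ⟨M, hM⟩ : ∃ m, PySem.List.max? piles (fun x => x) = some m := by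
    cases h : PySem.List.max? piles (fun x => x) with
    | none => exact absurd ((PySem.List.max?_eq_none_iff piles (fun x => x)).mp h) hne
    | some m => exact ⟨m, rfl⟩
  rw [hM]
  show kokoSearch piles h_ (M - 1).toNat 1 M = scanB piles h_ (M - 1).toNat M 1
  have hMmem : M ∈ piles := PySem.List.max?_mem hM
  rcases le_or_gt M 0 with hM0 | hM0
  · rw [kokoSearch_of_hi_nonpos piles h_ M hM0, scanB_of_hi_nonpos piles h_ M hM0]
  · apply main_of_mono piles h_ M (by omega)
    rcases hdisj with hpos | hneg | hsum
    · -- all piles nonnegative: hours is antitone in the speed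
      intro k k' hk hkk hfeas
      unfold pvFeas at *
      exact le_trans (hours_antitone piles k k' hpos hk hkk) hfeas
    · -- all piles ≤ 0 contradicts 0 < M ∈ piles
      exact absurd (hneg M hMmem) (by omega)
    · -- positive total ≤ h: every speed ≥ 1 is feasible
      intro k k' hk hkk _
      unfold pvFeas
      exact le_trans (hours_le_sum_max piles k' (by omega)) hsum
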